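-- pv_equiv track=rewrite | github.com/HeMoreira/Crazy-Chess | services/utilitarios/impressoes.py | adicionarEspacosNoTitulo
-- ===== SOURCE A (Python) =====
-- def adicionarEspacosNoTitulo(titulo:str):
--     novo_titulo = titulo
--     adicionar_a_esquerda = True
--     while len(novo_titulo) < 49:
--         if adicionar_a_esquerda == True:
--             novo_titulo = " " + novo_titulo
--         else:
--             novo_titulo = novo_titulo + " "
--         adicionar_a_esquerda = not adicionar_a_esquerda
--     return novo_titulo
-- ===== SOURCE B (Python) =====
-- def adicionarEspacosNoTitulo(titulo: str):
--     n = max(0, 49 - len(titulo))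
--     return " " * ((n + 1) // 2) + titulo + " " * (n // 2)
-- ===== Notes on version B (the rewrite author's own statement) =====
-- stated objective: simpler
-- what changed: Replaces the one-space-at-a-time alternating while loop with a closed-form computation: left pad = ceil(N/2), right pad = floor(N/2) where N = max(0, 49 - len(titulo)).
import Mathlib
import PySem

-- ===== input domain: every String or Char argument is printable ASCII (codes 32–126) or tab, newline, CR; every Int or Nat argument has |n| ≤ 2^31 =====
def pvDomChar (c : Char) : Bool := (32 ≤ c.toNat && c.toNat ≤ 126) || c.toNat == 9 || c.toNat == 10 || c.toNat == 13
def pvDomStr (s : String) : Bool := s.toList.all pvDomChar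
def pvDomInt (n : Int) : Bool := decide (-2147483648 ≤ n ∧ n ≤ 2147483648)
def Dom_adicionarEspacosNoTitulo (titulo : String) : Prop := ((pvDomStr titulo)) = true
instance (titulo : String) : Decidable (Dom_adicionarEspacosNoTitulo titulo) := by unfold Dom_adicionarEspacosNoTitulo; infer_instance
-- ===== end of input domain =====

-- B replaces A's one-space-at-a-time alternating while loop by a closed-form pad
-- (left = ceil(N/2), right = floor(N/2), N = max(0, 49 - len)); objective: simpler.

-- ===== PORT A =====
-- while len(novo_titulo) < 49: prepend/append one space, alternating, left first
def pvLoopA (l : List Char) (addLeft : Bool) : List Char :=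
  if l.length < 49 then
    if addLeft then pvLoopA (' ' :: l) false
    else pvLoopA (l ++ [' ']) true
  else l
termination_by 49 - l.length
decreasing_by
  · simp; omega
  · simp; omega

def adicionarEspacosNoTitulo (titulo : String) : String :=
  String.ofList (pvLoopA titulo.toList true)

-- ===== PORT B =====
def adicionarEspacosNoTitulo_alt (titulo : String) : String :=
  let n : Int := max 0 (49 - (titulo.toList.length : Int))
  String.ofList (List.replicate (PySem.Int.floordiv (n + 1) 2).toNat ' '
             ++ titulo.toList
             ++ List.replicate (PySem.Int.floordiv n 2).toNat ' ')

-- ===== PRECONDITION & SPEC =====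
def Spec_adicionarEspacosNoTitulo (titulo : String) (out : String) : Prop := out = adicionarEspacosNoTitulo_alt titulo
instance (titulo : String) (out : String) : Decidable (Spec_adicionarEspacosNoTitulo titulo out) := by unfold Spec_adicionarEspacosNoTitulo; infer_instance

-- ===== CLAIM (what is proved, stated in full; the proofs are below) =====
def Claim_equal_adicionarEspacosNoTitulo : Prop := ∀ (titulo : String), Dom_adicionarEspacosNoTitulo titulo → Spec_adicionarEspacosNoTitulo titulo (adicionarEspacosNoTitulo titulo)

-- ===== LEMMAS AND PROOFS =====

theorem pvLoopA_closed : ∀ (n : Nat) (l : List Char) (b : Bool), 49 - l.length = n →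
    pvLoopA l b =
      (if b then List.replicate ((n + 1) / 2) ' ' ++ l ++ List.replicate (n / 2) ' '
       else List.replicate (n / 2) ' ' ++ l ++ List.replicate ((n + 1) / 2) ' ') := by
  intro n
  induction n with
  | zero =>
    intro l b h
    rw [pvLoopA]
    rw [if_neg (by omega : ¬ l.length < 49)]
    cases b <;> simp
  | succ k ih =>
    intro l b h
    rw [pvLoopA]
    rw [if_pos (by omega : l.length < 49)]
    have h2 : (k + 1 + 1) / 2 = k / 2 + 1 := by omega
    cases b with
    | true =>
      rw [if_pos rfl, ih (' ' :: l) false (by simp only [List.length_cons]; omega)]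
      rw [if_neg (by simp), if_pos rfl, h2, List.replicate_succ']
      simp
    | false =>
      rw [if_neg (by simp), ih (l ++ [' ']) true (by simp [List.length_append]; omega)]
      rw [if_pos rfl, if_neg (by simp), h2, List.replicate_succ]
      simp

theorem floordiv_toNat (m : Nat) : (PySem.Int.floordiv (m : Int) 2).toNat = m / 2 := by
  rw [PySem.Int.floordiv_eq_ediv_of_pos (by norm_num : (0:Int) < 2)]
  omega

-- ===== VERDICT (by name: the statement is the Claim_ definition above) =====
theorem adicionarEspacosNoTitulo_spec : Claim_equal_adicionarEspacosNoTitulo := by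
  intro titulo _
  unfold Spec_adicionarEspacosNoTitulo adicionarEspacosNoTitulo adicionarEspacosNoTitulo_alt
  set l := titulo.toList with hl
  have hn : max 0 (49 - (l.length : Int)) = ((49 - l.length : Nat) : Int) := by omega
  rw [pvLoopA_closed (49 - l.length) l true rfl, if_pos rfl]
  have h1 : ((49 - l.length : Nat) : Int) + 1 = ((49 - l.length + 1 : Nat) : Int) := by
    push_cast; ring
  simp only [hn, h1, floordiv_toNat]
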